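-- pv_equiv track=rewrite | github.com/Uzumaki-Naruto07/Tamkeen-Ai | TamkeenAI_CareerSystem/backend/core/career_planning.py | _map_role_to_path
-- ===== SOURCE A (Python) =====
-- from typing import Dict, List, Any, Optional, Tuple, Union
--
-- def _map_role_to_path(role: str, path: Dict[str, Any]) -> Tuple[Dict[str, Any], List[Dict[str, Any]]]:
--     """
--     Map current role to a stage in the career path
--
--     Args:
--         role: Current role
--         path: Career path
--
--     Returns:
--         Tuple of (current stage, next stages)
--     """
--     stages = path.get("stages", [])
--
--     # If no stages, return empty results
--     if not stages:
--         return {}, []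
--
--     # Try to find exact match
--     for i, stage in enumerate(stages):
--         if role.lower() == stage["title"].lower():
--             # Found exact match
--             current_stage = stage
--             next_stages = stages[i+1:] if i < len(stages) - 1 else []
--             return current_stage, next_stages
--
--     # Try to find partial match
--     for i, stage in enumerate(stages):
--         if role.lower() in stage["title"].lower() or stage["title"].lower() in role.lower():
--             # Found partial match
--             current_stage = stage
--             next_stages = stages[i+1:] if i < len(stages) - 1 else []
--             return current_stage, next_stages
--
--     # If no match found, try to infer based on keywords
--     level_terms = {
--         "junior": 0,
--         "associate": 0,
--         "intern": 0,
--         "entry": 0,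
--         "senior": 2,
--         "lead": 3,
--         "staff": 3,
--         "principal": 4,
--         "architect": 4,
--         "director": 4,
--         "head": 4,
--         "vp": 5,
--         "chief": 5
--     }
--
--     role_lower = role.lower()
--     inferred_level = 1  # Default to mid-level
--
--     for term, level in level_terms.items():
--         if term in role_lower:
--             inferred_level = level
--             break
--
--     # Map inferred level to stage
--     if inferred_level >= len(stages):
--         inferred_level = len(stages) - 1
--
--     current_stage = stages[inferred_level]
--     next_stages = stages[inferred_level+1:] if inferred_level < len(stages) - 1 else []
--
--     return current_stage, next_stages
-- ===== SOURCE B (Python) =====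
-- def _map_role_to_path(role, path):
--     """Single-pass re-implementation: one loop records first exact and first
--     partial match indices; stage/next computed once at the end."""
--     stages = path.get("stages", [])
--     if not stages:
--         return {}, []
--
--     rl = role.lower()
--     exact_idx = None
--     partial_idx = None
--     for i, stage in enumerate(stages):
--         t = stage["title"].lower()
--         if exact_idx is None and t == rl:
--             exact_idx = i
--         if partial_idx is None and (rl in t or t in rl):
--             partial_idx = i
--
--     idx = exact_idx if exact_idx is not None else partial_idx
--     if idx is None:
--         level_terms = {
--             "junior": 0,
--             "associate": 0,
--             "intern": 0,
--             "entry": 0,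
--             "senior": 2,
--             "lead": 3,
--             "staff": 3,
--             "principal": 4,
--             "architect": 4,
--             "director": 4,
--             "head": 4,
--             "vp": 5,
--             "chief": 5
--         }
--         idx = 1
--         for term, level in level_terms.items():
--             if term in rl:
--                 idx = level
--                 break
--         if idx >= len(stages):
--             idx = len(stages) - 1
--
--     return stages[idx], stages[idx + 1:]
-- ===== Notes on version B (the rewrite author's own statement) =====
-- stated objective: alternative
-- what changed: Replaces A's two sequential early-return scans (exact, then partial) by a single loop that records the first exact-match and first partial-match indices, then computes the stage and its successors once at the end.
-- outside the precondition, e.g. on _map_role_to_path('a', {'stages': [{'title': 'a'}, {}]}): A returns ({'title': 'a'}, [{}]), B raises KeyError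
import Mathlib
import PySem

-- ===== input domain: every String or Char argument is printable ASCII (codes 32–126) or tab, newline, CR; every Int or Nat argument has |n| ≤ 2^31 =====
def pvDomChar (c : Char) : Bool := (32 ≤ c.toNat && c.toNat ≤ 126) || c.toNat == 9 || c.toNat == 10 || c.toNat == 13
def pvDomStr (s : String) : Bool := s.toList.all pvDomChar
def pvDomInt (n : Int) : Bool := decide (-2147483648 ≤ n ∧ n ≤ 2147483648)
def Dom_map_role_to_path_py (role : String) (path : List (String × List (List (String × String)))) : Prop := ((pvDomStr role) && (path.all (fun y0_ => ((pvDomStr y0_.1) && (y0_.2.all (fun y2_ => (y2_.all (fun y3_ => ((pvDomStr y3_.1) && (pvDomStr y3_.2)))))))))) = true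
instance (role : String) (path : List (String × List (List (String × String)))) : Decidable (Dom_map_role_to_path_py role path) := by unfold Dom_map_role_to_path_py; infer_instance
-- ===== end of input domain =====

-- B replaces A's two sequential early-return scans by a single loop recording the first
-- exact- and first partial-match indices, then computes stage/next once at the end (objective: alternative).

-- ===== PORT A =====

-- level_terms dict (insertion order preserved), shared constant of the module
def pvLevelTerms : List (String × Int) :=
  [("junior", 0), ("associate", 0), ("intern", 0), ("entry", 0),
   ("senior", 2), ("lead", 3), ("staff", 3),
   ("principal", 4), ("architect", 4), ("director", 4), ("head", 4),
   ("vp", 5), ("chief", 5)]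

-- stage["title"]; total via default "" — Pre_ guarantees the key is present
def pvTitleA (stage : List (String × String)) : String :=
  (PySem.Dict.mk stage).getD "title" ""

-- first loop: exact match; the carried `rest` IS stages[i+1:] (= [] when i = len-1)
def pvExactA (rl : String) : List (List (String × String)) →
    Option ((List (String × String)) × List (List (String × String)))
  | [] => none
  | s :: rest =>
    if rl == PySem.Str.lower (pvTitleA s) then some (s, rest) else pvExactA rl rest

-- second loop: partial match
def pvPartialA (rl : String) : List (List (String × String)) →
    Option ((List (String × String)) × List (List (String × String)))
  | [] => none
  | s :: rest =>
    if PySem.Str.isIn rl (PySem.Str.lower (pvTitleA s))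
        || PySem.Str.isIn (PySem.Str.lower (pvTitleA s)) rl then some (s, rest)
    else pvPartialA rl rest

-- keyword-inference loop with break; default mid-level 1
def pvInferA (rl : String) : List (String × Int) → Int
  | [] => 1
  | (term, level) :: rest => if PySem.Str.isIn term rl then level else pvInferA rl rest

def map_role_to_path_py (role : String) (path : List (String × List (List (String × String)))) : (List (String × String)) × (List (List (String × String))) :=
  let stages := (PySem.Dict.mk path).getD "stages" []
  if stages.isEmpty then ([], [])
  else
    match pvExactA (PySem.Str.lower role) stages with
    | some (cur, rest) => (cur, rest)
    | none =>
      match pvPartialA (PySem.Str.lower role) stages with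
      | some (cur, rest) => (cur, rest)
      | none =>
        let lvl0 := pvInferA (PySem.Str.lower role) pvLevelTerms
        let lvl := if lvl0 ≥ (stages.length : Int) then (stages.length : Int) - 1 else lvl0
        (PySem.List.pyGetD stages lvl [],
         if lvl < (stages.length : Int) - 1 then PySem.List.slice stages (some (lvl + 1)) none else [])

-- ===== PORT B =====

def pvTitleB (stage : List (String × String)) : String :=
  (PySem.Dict.mk stage).getD "title" ""

-- single pass: first exact-match index and first partial-match index
def pvScanB (rl : String) : List (List (String × String)) → Nat → Option Nat → Option Nat →
    Option Nat × Option Nat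
  | [], _, e, p => (e, p)
  | s :: rest, i, e, p =>
    let t := PySem.Str.lower (pvTitleB s)
    pvScanB rl rest (i + 1)
      (if e.isNone && (t == rl) then some i else e)
      (if p.isNone && (PySem.Str.isIn rl t || PySem.Str.isIn t rl) then some i else p)

def pvInferB (rl : String) : List (String × Int) → Int
  | [] => 1
  | (term, level) :: rest => if PySem.Str.isIn term rl then level else pvInferB rl rest

def map_role_to_path_py_alt (role : String) (path : List (String × List (List (String × String)))) : (List (String × String)) × (List (List (String × String))) :=
  let stages := (PySem.Dict.mk path).getD "stages" []
  if stages.isEmpty then ([], [])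
  else
    let rl := PySem.Str.lower role
    let ep := pvScanB rl stages 0 none none
    let idx : Int :=
      match ep.1.or ep.2 with
      | some i => (i : Int)
      | none =>
        let l := pvInferB rl pvLevelTerms
        if l ≥ (stages.length : Int) then (stages.length : Int) - 1 else l
    (PySem.List.pyGetD stages idx [], PySem.List.slice stages (some (idx + 1)) none)

-- ===== PRECONDITION & SPEC =====
-- Pre_ excludes paths in which some stage lacks a "title" key: Python A raises KeyError there
-- unless an earlier stage already matched, and Python B's single pass reads every title, so B
-- raises KeyError on all such inputs (including the few where A still returns).
def Pre_map_role_to_path_py (role : String) (path : List (String × List (List (String × String)))) : Prop :=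
  ∀ s ∈ (PySem.Dict.mk path).getD "stages" [], (PySem.Dict.mk s).contains "title" = true
instance (role : String) (path : List (String × List (List (String × String)))) : Decidable (Pre_map_role_to_path_py role path) := by unfold Pre_map_role_to_path_py; infer_instance

def pvWitness_map_role_to_path_py : String × (List (String × List (List (String × String)))) :=
  ("engineer", [("stages", [[("title", "Junior Engineer")], [("title", "Engineer")]])])

def Spec_map_role_to_path_py (role : String) (path : List (String × List (List (String × String)))) (out : (List (String × String)) × (List (List (String × String)))) : Prop := out = map_role_to_path_py_alt role path
instance (role : String) (path : List (String × List (List (String × String)))) (out : (List (String × String)) × (List (List (String × String)))) : Decidable (Spec_map_role_to_path_py role path out) := by unfold Spec_map_role_to_path_py; infer_instance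

-- ===== CLAIM (what is proved, stated in full; the proofs are below) =====
def Claim_equal_map_role_to_path_py : Prop := ∀ (role : String) (path : List (String × List (List (String × String)))), Dom_map_role_to_path_py role path → Pre_map_role_to_path_py role path → Spec_map_role_to_path_py role path (map_role_to_path_py role path)

-- ===== LEMMAS AND PROOFS =====

theorem pvTitle_eq : pvTitleA = pvTitleB := rfl

theorem pvInfer_eq (rl : String) (l : List (String × Int)) : pvInferA rl l = pvInferB rl l := by
  induction l with
  | nil => rfl
  | cons x rest ih => cases x; simp [pvInferA, pvInferB, ih]

theorem pvInferA_nonneg (rl : String) (l : List (String × Int)) (h : ∀ x ∈ l, 0 ≤ x.2) :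
    0 ≤ pvInferA rl l := by
  induction l with
  | nil => simp [pvInferA]
  | cons x rest ih =>
    cases x with
    | mk t lv =>
      simp only [pvInferA]
      split
      · exact h (t, lv) (by simp)
      · exact ih (fun y hy => h y (by simp [hy]))

theorem pvExactA_eq_findIdx? (rl : String) (stages : List (List (String × String))) :
    pvExactA rl stages =
      (stages.findIdx? (fun s => rl == PySem.Str.lower (pvTitleA s))).map
        (fun i => (stages.getD i [], stages.drop (i + 1))) := by
  induction stages with
  | nil => rfl
  | cons s rest ih =>
    by_cases h : (rl == PySem.Str.lower (pvTitleA s)) = true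
    · simp [pvExactA, List.findIdx?_cons, h]
    · simp only [pvExactA, List.findIdx?_cons, h, Bool.false_eq_true, not_false_iff,
        ite_false, ih, Option.map_map]
      cases hf : rest.findIdx? (fun s => rl == PySem.Str.lower (pvTitleA s)) <;>
        simp [hf, Function.comp, List.getD_cons_succ]

theorem pvPartialA_eq_findIdx? (rl : String) (stages : List (List (String × String))) :
    pvPartialA rl stages =
      (stages.findIdx? (fun s => PySem.Str.isIn rl (PySem.Str.lower (pvTitleA s))
          || PySem.Str.isIn (PySem.Str.lower (pvTitleA s)) rl)).map
        (fun i => (stages.getD i [], stages.drop (i + 1))) := by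
  induction stages with
  | nil => rfl
  | cons s rest ih =>
    by_cases h : (PySem.Str.isIn rl (PySem.Str.lower (pvTitleA s))
        || PySem.Str.isIn (PySem.Str.lower (pvTitleA s)) rl) = true
    · simp only [pvPartialA, List.findIdx?_cons, h, ite_true, Option.map_some,
        List.getD_cons_zero, List.drop_succ_cons, List.drop_zero]
    · simp only [pvPartialA, List.findIdx?_cons, h, Bool.false_eq_true, not_false_iff,
        ite_false, ih, Option.map_map]
      cases hf : rest.findIdx? (fun s => PySem.Str.isIn rl (PySem.Str.lower (pvTitleA s))
          || PySem.Str.isIn (PySem.Str.lower (pvTitleA s)) rl) <;>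
        simp [hf, Function.comp, List.getD_cons_succ]

theorem map_shift (o : Option Nat) (i : Nat) :
    (o.map (· + 1)).map (· + i) = o.map (· + (i + 1)) := by
  cases o <;> simp <;> omega

theorem pvScanB_eq (rl : String) (stages : List (List (String × String))) :
    ∀ (i : Nat) (e p : Option Nat),
      pvScanB rl stages i e p =
        (e.or ((stages.findIdx? (fun s => PySem.Str.lower (pvTitleB s) == rl)).map (· + i)),
         p.or ((stages.findIdx? (fun s => PySem.Str.isIn rl (PySem.Str.lower (pvTitleB s))
             || PySem.Str.isIn (PySem.Str.lower (pvTitleB s)) rl)).map (· + i))) := by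
  induction stages with
  | nil => intro i e p; cases e <;> cases p <;> rfl
  | cons s rest ih =>
    intro i e p
    simp only [pvScanB, ih, List.findIdx?_cons, Prod.mk.injEq]
    refine ⟨?_, ?_⟩
    · cases e with
      | some a => simp
      | none =>
        simp only [Option.isNone_none, Bool.true_and, Option.none_or]
        split_ifs with h
        · simp
        · rw [Option.none_or, map_shift]
    · cases p with
      | some a => simp
      | none =>
        simp only [Option.isNone_none, Bool.true_and, Option.none_or]
        split_ifs with h
        · simp
        · rw [Option.none_or, map_shift]

theorem beq_comm_str (a b : String) : (a == b) = (b == a) := by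
  by_cases h : a = b
  · simp [h]
  · simp [h, Ne.symm h]

theorem findIdx?_lt_length' {α : Type} (p : α → Bool) (l : List α) (i : Nat)
    (h : l.findIdx? p = some i) : i < l.length := by
  have := List.findIdx?_eq_some_iff_findIdx_eq.mp h
  omega

-- ===== VERDICT (by name: the statement is the Claim_ definition above) =====
theorem map_role_to_path_py_spec : Claim_equal_map_role_to_path_py := by
  intro role path _hdom _hpre
  unfold Spec_map_role_to_path_py map_role_to_path_py map_role_to_path_py_alt
  set stages := (PySem.Dict.mk path).getD "stages" [] with hst
  by_cases hemp : stages.isEmpty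
  · simp [hemp]
  · simp only [hemp, Bool.false_eq_true, ite_false]
    set rl := PySem.Str.lower role with hrl
    have hpeq : (fun s => PySem.Str.lower (pvTitleB s) == rl)
        = (fun s => rl == PySem.Str.lower (pvTitleA s)) := by
      funext s; rw [pvTitle_eq, beq_comm_str]
    rw [pvScanB_eq, pvExactA_eq_findIdx?, pvPartialA_eq_findIdx?, hpeq, ← pvTitle_eq]
    cases he : stages.findIdx? (fun s => rl == PySem.Str.lower (pvTitleA s)) with
    | some i =>
      have hi := findIdx?_lt_length' _ _ _ he
      simp only [Option.map_some, Option.none_or, Option.some_or, Nat.add_zero]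
      rw [show ((i : Nat) : Int) + 1 = (((i + 1 : Nat)) : Int) by push_cast; ring,
        PySem.List.slice_from_natCast, PySem.List.pyGetD_natCast]
    | none =>
      simp only [Option.map_none, Option.none_or]
      cases hp : stages.findIdx? (fun s => PySem.Str.isIn rl (PySem.Str.lower (pvTitleA s))
          || PySem.Str.isIn (PySem.Str.lower (pvTitleA s)) rl) with
      | some j =>
        have hj := findIdx?_lt_length' _ _ _ hp
        simp only [Option.map_none, Option.map_some, Option.none_or, Option.some_or, Nat.add_zero]
        rw [show ((j : Nat) : Int) + 1 = (((j + 1 : Nat)) : Int) by push_cast; ring,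
          PySem.List.slice_from_natCast, PySem.List.pyGetD_natCast]
      | none =>
        simp only [Option.map_none]
        rw [← pvInfer_eq]
        set lvl0 := pvInferA rl pvLevelTerms with hl0
        have h0 : 0 ≤ lvl0 := pvInferA_nonneg rl pvLevelTerms (by decide)
        have hne : stages ≠ [] := by simpa using hemp
        have hlen : 1 ≤ stages.length := by
          have := List.length_pos_of_ne_nil hne; omega
        set lvl := if lvl0 ≥ (stages.length : Int) then (stages.length : Int) - 1 else lvl0 with hlvl
        have hb : 0 ≤ lvl ∧ lvl ≤ (stages.length : Int) - 1 := by
          rw [hlvl]; split <;> constructor <;> omega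
        refine Prod.ext rfl ?_
        by_cases hc : lvl < (stages.length : Int) - 1
        · simp [hc]
        · simp only [hc, ite_false]
          have hEq : lvl + 1 = ((stages.length : Nat) : Int) := by omega
          rw [hEq, PySem.List.slice_from_natCast, List.drop_length]
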